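-- pv_equiv track=rewrite | github.com/pauljasek/Wordle-Solver | app/app.py | generate_clue
-- ===== SOURCE A (Python) =====
-- YELLOW = 1
--
-- GREEN = 2
--
-- def occurrences(letter, word):
--     count = 0
--     for l in word:
--         if l == letter:
--             count += 1
--     return count
--
-- def generate_clue(guess, word):
--     guessed_letters = ''
--     clue = [0,0,0,0,0]
--     for i in range(len(guess)):
--         if guess[i] == word[i]:
--             clue[i] = GREEN
--             guessed_letters = guessed_letters + guess[i]
--     for i in range(len(guess)):
--         if clue[i] == 0 and occurrences(guess[i], word) > occurrences(guess[i], guessed_letters):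
--             clue[i] = YELLOW
--             guessed_letters = guessed_letters + guess[i]
--     return tuple(clue)
-- ===== SOURCE B (Python) =====
-- YELLOW = 1
--
-- GREEN = 2
--
-- def generate_clue(guess, word):
--     n = len(guess)
--     clue = [0, 0, 0, 0, 0]
--     for i in range(n):
--         c = guess[i]
--         if c == word[i]:
--             clue[i] = GREEN
--         else:
--             greens = sum(1 for j in range(n) if guess[j] == c and guess[j] == word[j])
--             rank = sum(1 for j in range(i) if guess[j] == c and guess[j] != word[j])
--             if rank + greens < word.count(c):
--                 clue[i] = YELLOW
--     return tuple(clue)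
-- ===== Notes on version B (the rewrite author's own statement) =====
-- stated objective: alternative
-- what changed: Replaces A's stateful two-pass accumulation of guessed_letters by a closed-form per-position rule: a non-green position i is yellow iff the number of earlier non-green occurrences of that letter plus its green matches is below word.count(letter), so the clue at each index is a pure function of (guess, word, i) with no mutable accumulator.
import Mathlib
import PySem

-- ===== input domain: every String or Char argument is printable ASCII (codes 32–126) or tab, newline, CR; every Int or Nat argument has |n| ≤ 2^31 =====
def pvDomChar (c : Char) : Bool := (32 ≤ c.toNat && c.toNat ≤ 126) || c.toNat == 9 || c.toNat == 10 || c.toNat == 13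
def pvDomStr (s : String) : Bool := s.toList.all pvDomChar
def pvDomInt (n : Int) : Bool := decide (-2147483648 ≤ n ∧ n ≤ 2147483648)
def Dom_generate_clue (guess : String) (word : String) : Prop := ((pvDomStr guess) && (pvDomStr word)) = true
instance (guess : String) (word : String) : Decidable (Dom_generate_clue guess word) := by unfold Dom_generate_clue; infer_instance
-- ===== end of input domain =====

-- B replaces A's stateful guessed-letters accumulation by a closed-form per-position rule
-- (earlier non-green occurrences + green matches < count in word); same return value on Pre_.


-- ===== PORT A =====
def occurrences (letter : Char) (word : List Char) : Int :=
  word.foldl (fun count l => if l = letter then count + 1 else count) 0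

-- loop body of A's first for-loop (green pass)
def stepA1 (g w : List Char) (st : List Int × List Char) (i : Int) : List Int × List Char :=
  if PySem.List.pyGetD g i ' ' = PySem.List.pyGetD w i ' ' then
    (PySem.List.pySetD st.1 i 2, st.2 ++ [PySem.List.pyGetD g i ' '])
  else st

-- loop body of A's second for-loop (yellow pass)
def stepA2 (g w : List Char) (st : List Int × List Char) (i : Int) : List Int × List Char :=
  if PySem.List.pyGetD st.1 i 0 = 0 ∧
      occurrences (PySem.List.pyGetD g i ' ') w > occurrences (PySem.List.pyGetD g i ' ') st.2 then
    (PySem.List.pySetD st.1 i 1, st.2 ++ [PySem.List.pyGetD g i ' '])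
  else st

def generate_clue (guess : String) (word : String) : Int × Int × Int × Int × Int :=
  let g := guess.toList
  let w := word.toList
  let st1 := (PySem.List.pyRange 0 (g.length : Int) 1).foldl (stepA1 g w) ([0, 0, 0, 0, 0], [])
  let st2 := (PySem.List.pyRange 0 (g.length : Int) 1).foldl (stepA2 g w) st1
  (st2.1.getD 0 0, st2.1.getD 1 0, st2.1.getD 2 0, st2.1.getD 3 0, st2.1.getD 4 0)

-- ===== PORT B =====
-- sum(1 for j in range(n) if guess[j] == c and guess[j] == word[j])
def greensOf (g w : List Char) (n : Int) (c : Char) : Int :=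
  (PySem.List.pyRange 0 n 1).foldl
    (fun acc j => if PySem.List.pyGetD g j ' ' = c ∧ PySem.List.pyGetD g j ' ' = PySem.List.pyGetD w j ' '
                  then acc + 1 else acc) 0

-- sum(1 for j in range(i) if guess[j] == c and guess[j] != word[j])
def rankOf (g w : List Char) (i : Int) (c : Char) : Int :=
  (PySem.List.pyRange 0 i 1).foldl
    (fun acc j => if PySem.List.pyGetD g j ' ' = c ∧ ¬ PySem.List.pyGetD g j ' ' = PySem.List.pyGetD w j ' '
                  then acc + 1 else acc) 0

-- one iteration of B's single loop: the written value is a pure function of (guess, word, i)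
def stepB (word : String) (g w : List Char) (clue : List Int) (i : Int) : List Int :=
  let c := PySem.List.pyGetD g i ' '
  if c = PySem.List.pyGetD w i ' ' then PySem.List.pySetD clue i 2
  else if rankOf g w i c + greensOf g w (g.length : Int) c < (PySem.Str.count word (String.ofList [c]) : Int) then
    PySem.List.pySetD clue i 1
  else clue

def generate_clue_alt (guess : String) (word : String) : Int × Int × Int × Int × Int :=
  let g := guess.toList
  let w := word.toList
  let clue := (PySem.List.pyRange 0 (g.length : Int) 1).foldl (stepB word g w) [0, 0, 0, 0, 0]
  (clue.getD 0 0, clue.getD 1 0, clue.getD 2 0, clue.getD 3 0, clue.getD 4 0)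

-- ===== PRECONDITION & SPEC =====
-- Python A raises IndexError when len(guess) > 5 (reading/writing clue[i]) or
-- len(guess) > len(word) (reading word[i]); exactly those inputs are excluded.
def Pre_generate_clue (guess : String) (word : String) : Prop :=
  guess.toList.length ≤ 5 ∧ guess.toList.length ≤ word.toList.length
instance (guess : String) (word : String) : Decidable (Pre_generate_clue guess word) := by
  unfold Pre_generate_clue; infer_instance

def pvWitness_generate_clue : String × String := ("crane", "crate")

def Spec_generate_clue (guess : String) (word : String) (out : Int × Int × Int × Int × Int) : Prop := out = generate_clue_alt guess word
instance (guess : String) (word : String) (out : Int × Int × Int × Int × Int) : Decidable (Spec_generate_clue guess word out) := by unfold Spec_generate_clue; infer_instance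

-- ===== CLAIM (what is proved, stated in full; the proofs are below) =====
def Claim_equal_generate_clue : Prop := ∀ (guess : String) (word : String), Dom_generate_clue guess word → Pre_generate_clue guess word → Spec_generate_clue guess word (generate_clue guess word)

-- ===== LEMMAS AND PROOFS =====

-- Nat-level counting functions used to characterise both programs positionally.
def grCnt (g w : List Char) (c : Char) (m : Nat) : Nat :=
  (List.range m).countP (fun j => decide (g[j]?.getD ' ' = c ∧ g[j]?.getD ' ' = w[j]?.getD ' '))

def ngCnt (g w : List Char) (c : Char) (m : Nat) : Nat :=
  (List.range m).countP (fun j => decide (g[j]?.getD ' ' = c ∧ ¬ g[j]?.getD ' ' = w[j]?.getD ' '))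

-- the clue value both programs produce at position i (i < len guess)
def tgt (g w : List Char) (n : Nat) (i : Nat) : Int :=
  if g[i]?.getD ' ' = w[i]?.getD ' ' then 2
  else if ngCnt g w (g[i]?.getD ' ') i + grCnt g w (g[i]?.getD ' ') n < w.count (g[i]?.getD ' ') then 1 else 0

theorem occurrences_eq_count (c : Char) (xs : List Char) :
    occurrences c xs = (xs.count c : Int) := by
  unfold occurrences
  rw [PySem.List.foldl_ite_add_one]
  simp [List.count_eq_countP]
  congr 1

theorem foldl_pyRange_natCast {α : Type} (f : α → Int → α) (n : Nat) (init : α) :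
    (PySem.List.pyRange 0 (n : Int) 1).foldl f init = (List.range n).foldl (fun a (k : Nat) => f a (k : Int)) init := by
  rw [PySem.List.pyRange_one, List.foldl_map]
  simp

theorem grCnt_succ (g w : List Char) (c : Char) (m : Nat) :
    grCnt g w c (m + 1) = grCnt g w c m + if g[m]?.getD ' ' = c ∧ g[m]?.getD ' ' = w[m]?.getD ' ' then 1 else 0 := by
  unfold grCnt
  rw [List.range_succ, List.countP_append]
  simp [List.countP_cons]

theorem ngCnt_succ (g w : List Char) (c : Char) (m : Nat) :
    ngCnt g w c (m + 1) = ngCnt g w c m + if g[m]?.getD ' ' = c ∧ ¬ g[m]?.getD ' ' = w[m]?.getD ' ' then 1 else 0 := by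
  unfold ngCnt
  rw [List.range_succ, List.countP_append]
  simp [List.countP_cons]

theorem getD_set_lt (l : List Int) (m i : Nat) (v : Int) (hm : m < l.length) :
    (l.set m v)[i]?.getD 0 = if i = m then v else l[i]?.getD 0 := by
  by_cases h : i = m
  · subst h; simp [List.getElem?_set_self, hm]
  · simp [List.getElem?_set_ne (fun he => h he.symm), h]

theorem map_getD_range_take (w : List Char) (n : Nat) (h : n ≤ w.length) :
    (List.range n).map (fun j => w[j]?.getD ' ') = w.take n := by
  induction n with
  | zero => simp
  | succ m ih =>
    rw [List.range_succ, List.map_append, ih (by omega), List.take_add_one]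
    congr 1
    simp [List.getElem?_eq_getElem (show m < w.length by omega)]

-- greens of a letter never exceed its occurrences in word
theorem grCnt_le_count (g w : List Char) (c : Char) (n : Nat) (h : n ≤ w.length) :
    grCnt g w c n ≤ w.count c := by
  have h1 : grCnt g w c n ≤ (List.range n).countP (fun j => decide (w[j]?.getD ' ' = c)) := by
    apply List.countP_mono_left
    intro j _ hj
    simp only [decide_eq_true_eq] at hj ⊢
    rw [← hj.2, hj.1]
  have h2 : (List.range n).countP (fun j => decide (w[j]?.getD ' ' = c)) = (w.take n).count c := by
    rw [← map_getD_range_take w n h, List.count_eq_countP, List.countP_map]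
    apply List.countP_congr
    intro j _
    simp only [Function.comp, beq_iff_eq, decide_eq_true_eq]
  have h3 : (w.take n).count c ≤ w.count c := (List.take_sublist n w).count_le c
  omega

-- PySem.Str.count for a single-character needle is List.count
theorem count_go_singleton (c : Char) (l : List Char) (fuel acc : Nat) (h : l.length ≤ fuel) :
    PySem.Chars.count.go [c] fuel l acc = acc + l.count c := by
  induction l generalizing fuel acc with
  | nil => cases fuel <;> simp [PySem.Chars.count.go]
  | cons x t ih =>
    cases fuel with
    | zero => simp at h
    | succ f =>
      simp only [PySem.Chars.count.go]
      by_cases hx : x = c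
      · subst hx
        rw [if_pos (by simp [List.isPrefixOf])]
        have hd : List.drop ([x].length) (x :: t) = t := by simp
        rw [hd, ih f (acc + 1) (by simp at h; omega)]
        simp [List.count_cons]
        omega
      · rw [if_neg (by simp [List.isPrefixOf]; intro he; exact hx he.symm)]
        rw [ih f acc (by simp at h; omega)]
        simp [List.count_cons, hx]

theorem str_count_singleton (word : String) (c : Char) :
    PySem.Str.count word (String.ofList [c]) = word.toList.count c := by
  rw [PySem.Str.count_eq]
  rw [String.toList_ofList]
  unfold PySem.Chars.count
  rw [if_neg (by simp)]
  rw [count_go_singleton c word.toList word.toList.length 0 (le_refl _)]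
  omega

-- bridge: B's Int-valued helper sums equal the Nat counting functions
theorem countP_pyRange_natCast (P : Int → Bool) (n : Nat) :
    (PySem.List.pyRange 0 (n : Int) 1).countP P = (List.range n).countP (fun k : Nat => P (k : Int)) := by
  rw [PySem.List.pyRange_one, List.countP_map]
  simp
  rfl

theorem greensOf_eq (g w : List Char) (n : Nat) (c : Char) :
    greensOf g w (n : Int) c = (grCnt g w c n : Int) := by
  unfold greensOf
  rw [PySem.List.foldl_ite_add_one, countP_pyRange_natCast]
  unfold grCnt
  simp [List.getD]

theorem rankOf_eq (g w : List Char) (i : Nat) (c : Char) :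
    rankOf g w (i : Int) c = (ngCnt g w c i : Int) := by
  unfold rankOf
  rw [PySem.List.foldl_ite_add_one, countP_pyRange_natCast]
  unfold ngCnt
  simp [List.getD]

-- characterisation of B's loop
theorem B_char (word : String) (g w : List Char) (n : Nat) (hn : n = g.length) (h5 : n ≤ 5) (hw : w = word.toList) :
    ∀ m, m ≤ n →
      ((List.range m).foldl (fun cl (k : Nat) => stepB word g w cl (k : Int)) [0, 0, 0, 0, 0]).length = 5 ∧
      ∀ i, i < 5 →
        ((List.range m).foldl (fun cl (k : Nat) => stepB word g w cl (k : Int)) [0, 0, 0, 0, 0])[i]?.getD 0 =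
          if i < m then tgt g w n i else 0 := by
  subst hn
  intro m hm
  induction m with
  | zero =>
    refine ⟨rfl, fun i hi => ?_⟩
    interval_cases i <;> rfl
  | succ p ih =>
    obtain ⟨ihl, ihv⟩ := ih (by omega)
    rw [List.range_succ, List.foldl_append, List.foldl_cons, List.foldl_nil]
    set cl := (List.range p).foldl (fun cl (k : Nat) => stepB word g w cl (k : Int)) [0, 0, 0, 0, 0] with hcl
    have hp5 : p < 5 := by omega
    unfold stepB
    simp only [PySem.List.pyGetD_natCast, PySem.List.pySetD_natCast, List.getD]
    by_cases hg : g[p]?.getD ' ' = w[p]?.getD ' '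
    · rw [if_pos hg]
      refine ⟨by simp [ihl], fun i hi => ?_⟩
      rw [getD_set_lt cl p i 2 (by omega), ihv i hi]
      have ht : tgt g w g.length p = 2 := by unfold tgt; rw [if_pos hg]
      by_cases hip : i = p
      · subst hip; simp [ht]
      · have hlt : (i < p + 1) = (i < p) := by
          apply propext; constructor <;> intro h <;> omega
        simp [hip, hlt]
    · rw [if_neg hg]
      rw [rankOf_eq, greensOf_eq, str_count_singleton, ← hw]
      by_cases hc : ngCnt g w (g[p]?.getD ' ') p + grCnt g w (g[p]?.getD ' ') g.length < w.count (g[p]?.getD ' ')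
      · rw [if_pos (by push_cast; omega)]
        refine ⟨by simp [ihl], fun i hi => ?_⟩
        rw [getD_set_lt cl p i 1 (by omega), ihv i hi]
        have ht : tgt g w g.length p = 1 := by
          unfold tgt; rw [if_neg hg, if_pos hc]
        by_cases hip : i = p
        · subst hip; simp [ht]
        · have hlt : (i < p + 1) = (i < p) := by
            apply propext; constructor <;> intro h <;> omega
          simp [hip, hlt]
      · rw [if_neg (by push_cast; omega)]
        refine ⟨ihl, fun i hi => ?_⟩
        rw [ihv i hi]
        have ht : tgt g w g.length p = 0 := by
          unfold tgt; rw [if_neg hg, if_neg hc]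
        by_cases hip : i = p
        · subst hip; simp [ht]
        · have hlt : (i < p + 1) = (i < p) := by
            apply propext; constructor <;> intro h <;> omega
          simp [hip, hlt]

-- characterisation of A's green pass
theorem A1_char (g w : List Char) (n : Nat) (hn : n = g.length) (h5 : n ≤ 5) (hlw : n ≤ w.length) :
    ∀ m, m ≤ n →
      (((List.range m).foldl (fun st (k : Nat) => stepA1 g w st (k : Int)) ([0, 0, 0, 0, 0], [])).1.length = 5) ∧
      (∀ i, i < 5 →
        ((List.range m).foldl (fun st (k : Nat) => stepA1 g w st (k : Int)) ([0, 0, 0, 0, 0], [])).1[i]?.getD 0 =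
          if i < m ∧ g[i]?.getD ' ' = w[i]?.getD ' ' then 2 else 0) ∧
      (∀ c, ((List.range m).foldl (fun st (k : Nat) => stepA1 g w st (k : Int)) ([0, 0, 0, 0, 0], [])).2.count c =
          grCnt g w c m) := by
  subst hn
  intro m hm
  induction m with
  | zero =>
    refine ⟨rfl, fun i hi => ?_, fun c => by simp [grCnt]⟩
    interval_cases i <;> rfl
  | succ p ih =>
    obtain ⟨ihl, ihv, ihc⟩ := ih (by omega)
    rw [List.range_succ, List.foldl_append, List.foldl_cons, List.foldl_nil]
    set st := (List.range p).foldl (fun st (k : Nat) => stepA1 g w st (k : Int)) ([0, 0, 0, 0, 0], []) with hst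
    have hp5 : p < 5 := by omega
    unfold stepA1
    simp only [PySem.List.pyGetD_natCast, PySem.List.pySetD_natCast, List.getD]
    by_cases hg : g[p]?.getD ' ' = w[p]?.getD ' '
    · rw [if_pos hg]
      refine ⟨by simp [ihl], fun i hi => ?_, fun c => ?_⟩
      · rw [getD_set_lt st.1 p i 2 (by omega), ihv i hi]
        by_cases hip : i = p
        · subst hip; simp [hg]
        · have hlt : (i < p + 1) = (i < p) := by
            apply propext; constructor <;> intro h <;> omega
          simp [hip, hlt]
      · rw [List.count_append, ihc c, grCnt_succ]
        by_cases hc : g[p]?.getD ' ' = c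
        · simp [hc, hg, hc.symm.trans hg]
        · by_cases hwc : w[p]?.getD ' ' = c <;> simp [hc, hg, hwc]
    · rw [if_neg hg]
      refine ⟨ihl, fun i hi => ?_, fun c => ?_⟩
      · rw [ihv i hi]
        by_cases hip : i = p
        · subst hip; simp [hg]
        · have hlt : (i < p + 1) = (i < p) := by
            apply propext; constructor <;> intro h <;> omega
          simp [hip, hlt]
      · rw [ihc c, grCnt_succ]
        simp [hg]

-- characterisation of A's yellow pass, starting from any state with pass-1 shape
theorem A2_char (g w : List Char) (n : Nat) (hn : n = g.length) (h5 : n ≤ 5) (hlw : n ≤ w.length)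
    (cl0 : List Int) (gl0 : List Char)
    (hl0 : cl0.length = 5)
    (hv0 : ∀ i, i < 5 → cl0[i]?.getD 0 = if i < n ∧ g[i]?.getD ' ' = w[i]?.getD ' ' then 2 else 0)
    (hc0 : ∀ c, gl0.count c = grCnt g w c n) :
    ∀ m, m ≤ n →
      (((List.range m).foldl (fun st (k : Nat) => stepA2 g w st (k : Int)) (cl0, gl0)).1.length = 5) ∧
      (∀ i, i < 5 →
        ((List.range m).foldl (fun st (k : Nat) => stepA2 g w st (k : Int)) (cl0, gl0)).1[i]?.getD 0 =
          if i < m then tgt g w n i else (if i < n ∧ g[i]?.getD ' ' = w[i]?.getD ' ' then 2 else 0)) ∧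
      (∀ c, ((List.range m).foldl (fun st (k : Nat) => stepA2 g w st (k : Int)) (cl0, gl0)).2.count c =
          grCnt g w c n + min (ngCnt g w c m) (w.count c - grCnt g w c n)) := by
  subst hn
  intro m hm
  induction m with
  | zero =>
    simp only [List.range_zero, List.foldl_nil]
    refine ⟨hl0, fun i hi => ?_, fun c => ?_⟩
    · rw [hv0 i hi]; simp
    · rw [hc0 c]; simp [ngCnt]
  | succ p ih =>
    obtain ⟨ihl, ihv, ihc⟩ := ih (by omega)
    rw [List.range_succ, List.foldl_append, List.foldl_cons, List.foldl_nil]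
    set st := (List.range p).foldl (fun st (k : Nat) => stepA2 g w st (k : Int)) (cl0, gl0) with hst
    have hp5 : p < 5 := by omega
    have hGle : grCnt g w (g[p]?.getD ' ') g.length ≤ w.count (g[p]?.getD ' ') :=
      grCnt_le_count g w (g[p]?.getD ' ') g.length hlw
    unfold stepA2
    simp only [PySem.List.pyGetD_natCast, PySem.List.pySetD_natCast, List.getD]
    have hvp : st.1[p]?.getD 0 = if p < g.length ∧ g[p]?.getD ' ' = w[p]?.getD ' ' then 2 else 0 := by
      rw [ihv p hp5]
      have hlt : ¬ (p < p) := by omega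
      simp [hlt]
    by_cases hg : g[p]?.getD ' ' = w[p]?.getD ' '
    · -- green position: condition clue[p] == 0 fails
      have hv2 : st.1[p]?.getD 0 = 2 := by rw [hvp, if_pos ⟨by omega, hg⟩]
      rw [if_neg (by rw [hv2]; simp)]
      refine ⟨ihl, fun i hi => ?_, fun c => ?_⟩
      · rw [ihv i hi]
        have ht : tgt g w g.length p = 2 := by unfold tgt; rw [if_pos hg]
        by_cases hip : i = p
        · subst hip
          have hilt : i < g.length := by omega
          have hgi : g[i] = w[i]?.getD ' ' := by
            rw [← hg]; simp [List.getElem?_eq_getElem hilt]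
          simp [ht, hilt, hgi]
        · have hlt : (i < p + 1) = (i < p) := by
            apply propext; constructor <;> intro h <;> omega
          simp [hip, hlt]
      · rw [ihc c, ngCnt_succ]
        simp [hg]
    · -- non-green position
      have hv0' : st.1[p]?.getD 0 = 0 := by rw [hvp]; simp [hg]
      have hocc : occurrences (g[p]?.getD ' ') w > occurrences (g[p]?.getD ' ') st.2 ↔
          ngCnt g w (g[p]?.getD ' ') p + grCnt g w (g[p]?.getD ' ') g.length < w.count (g[p]?.getD ' ') := by
        rw [occurrences_eq_count, occurrences_eq_count, ihc (g[p]?.getD ' ')]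
        omega
      by_cases hc : ngCnt g w (g[p]?.getD ' ') p + grCnt g w (g[p]?.getD ' ') g.length < w.count (g[p]?.getD ' ')
      · rw [if_pos ⟨hv0', hocc.mpr hc⟩]
        refine ⟨by simp [ihl], fun i hi => ?_, fun c => ?_⟩
        · rw [getD_set_lt st.1 p i 1 (by omega), ihv i hi]
          have ht : tgt g w g.length p = 1 := by
            unfold tgt; rw [if_neg hg, if_pos hc]
          by_cases hip : i = p
          · subst hip; simp [ht]
          · have hlt : (i < p + 1) = (i < p) := by
              apply propext; constructor <;> intro h <;> omega
            simp [hip, hlt]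
        · rw [List.count_append, ihc c, ngCnt_succ]
          by_cases hcc : g[p]?.getD ' ' = c
          · rw [← hcc] at *
            simp [hg]
            omega
          · have hne : List.count c [g[p]?.getD ' '] = 0 := by simp [hcc]
            rw [hne]
            simp [hcc]
      · rw [if_neg (fun hand => hc (hocc.mp hand.2))]
        refine ⟨ihl, fun i hi => ?_, fun c => ?_⟩
        · rw [ihv i hi]
          have ht : tgt g w g.length p = 0 := by
            unfold tgt; rw [if_neg hg, if_neg hc]
          by_cases hip : i = p
          · subst hip; simp [ht, hg]
          · have hlt : (i < p + 1) = (i < p) := by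
              apply propext; constructor <;> intro h <;> omega
            simp [hip, hlt]
        · rw [ihc c, ngCnt_succ]
          by_cases hcc : g[p]?.getD ' ' = c
          · rw [← hcc] at *
            simp [hg]
            omega
          · simp [hcc]

-- ===== VERDICT (by name: the statement is the Claim_ definition above) =====
theorem generate_clue_spec : Claim_equal_generate_clue := by
  intro guess word _ hpre
  obtain ⟨h5, hlen⟩ := hpre
  unfold Spec_generate_clue generate_clue generate_clue_alt
  simp only []
  set g := guess.toList with hg
  set w := word.toList with hw
  set n := g.length with hn
  rw [foldl_pyRange_natCast (stepA1 g w), foldl_pyRange_natCast (stepB word g w)]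
  obtain ⟨hl1, hv1, hc1⟩ := A1_char g w n rfl h5 hlen n (le_refl n)
  rw [show ((List.range n).foldl (fun st (k : Nat) => stepA1 g w st (k : Int)) ([0, 0, 0, 0, 0], []))
      = (((List.range n).foldl (fun st (k : Nat) => stepA1 g w st (k : Int)) ([0, 0, 0, 0, 0], [])).1,
         ((List.range n).foldl (fun st (k : Nat) => stepA1 g w st (k : Int)) ([0, 0, 0, 0, 0], [])).2) from rfl]
  rw [foldl_pyRange_natCast (stepA2 g w)]
  obtain ⟨hl2, hv2, hc2⟩ := A2_char g w n rfl h5 hlen _ _ hl1 hv1 hc1 n (le_refl n)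
  obtain ⟨hlB, hvB⟩ := B_char word g w n rfl h5 rfl n (le_refl n)
  have hfin : ∀ i, i < 5 →
      ((List.range n).foldl (fun st (k : Nat) => stepA2 g w st (k : Int))
        (((List.range n).foldl (fun st (k : Nat) => stepA1 g w st (k : Int)) ([0, 0, 0, 0, 0], [])).1,
         ((List.range n).foldl (fun st (k : Nat) => stepA1 g w st (k : Int)) ([0, 0, 0, 0, 0], [])).2)).1[i]?.getD 0 =
      ((List.range n).foldl (fun cl (k : Nat) => stepB word g w cl (k : Int)) [0, 0, 0, 0, 0])[i]?.getD 0 := by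
    intro i hi
    rw [hv2 i hi, hvB i hi]
    by_cases hin : i < n
    · simp [hin]
    · simp [hin]
  simp only [List.getD]
  rw [hfin 0 (by omega), hfin 1 (by omega), hfin 2 (by omega), hfin 3 (by omega), hfin 4 (by omega)]
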